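-- pv_equiv track=rewrite | github.com/MrBrantCode/unitest_baseline | mut_generate/mist_train_cf/cf_66612/solution.py | maximumPossible
-- ===== SOURCE A (Python) =====
-- def maximumPossible(num, k):
--     num = list(num)
--     i = 0
--     while k > 0 and i < len(num):
--         max_idx = -1
--         for j in range(i + 1, len(num)):
--             if j - i > k:
--                 break
--             if max_idx < 0 or num[j] > num[max_idx]:
--                 max_idx = j
--
--         if num[max_idx] > num[i]:
--             temp = num[max_idx]
--             for j in range(max_idx, i, -1):
--                 num[j] = num[j - 1]
--             num[i] = temp
--             k -= max_idx - i
--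
--         i += 1
--
--     return ''.join(num)
-- ===== SOURCE B (Python) =====
-- def maximumPossible(num, k):
--     # Greedy by selection-and-removal: repeatedly pop the leftmost maximum
--     # within the remaining budget from the front window and append it to the
--     # output, instead of rotating digits in place over the whole string.
--     rest = list(num)
--     out = []
--     while k > 0 and len(rest) > 1:
--         limit = min(k, len(rest) - 1)
--         m = 0
--         for t in range(1, limit + 1):
--             if rest[t] > rest[m]:
--                 m = t
--         out.append(rest[m])
--         rest = rest[:m] + rest[m + 1:]
--         k -= m
--     return ''.join(out + rest)
-- ===== Notes on version B (the rewrite author's own statement) =====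
-- stated objective: simpler
-- what changed: B replaces A's in-place index-juggling (sentinel max_idx=-1, a break-guarded scan over absolute indices, and an explicit element-shifting inner loop) by a selection-and-removal greedy: it repeatedly pops the leftmost maximum of the budget-limited front window from the remaining list and appends it to the output, stopping as soon as the budget is exhausted.
import Mathlib
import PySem

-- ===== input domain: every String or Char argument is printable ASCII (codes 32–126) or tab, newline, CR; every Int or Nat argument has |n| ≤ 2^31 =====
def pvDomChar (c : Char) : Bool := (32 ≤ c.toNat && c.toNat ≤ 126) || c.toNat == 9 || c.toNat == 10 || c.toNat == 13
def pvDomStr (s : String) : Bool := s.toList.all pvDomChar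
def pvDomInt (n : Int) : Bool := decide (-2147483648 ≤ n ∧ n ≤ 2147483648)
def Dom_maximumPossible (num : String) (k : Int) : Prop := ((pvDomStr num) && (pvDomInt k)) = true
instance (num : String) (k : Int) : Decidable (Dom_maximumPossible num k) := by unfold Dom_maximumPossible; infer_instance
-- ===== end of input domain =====

-- B replaces A's in-place rotation over absolute indices by a selection-and-removal
-- greedy on the remaining suffix (simpler decomposition; same cost).

-- ===== PORT A =====
-- inner 'for j in range(i+1, len(num)): if j-i>k: break; if max_idx<0 or num[j]>num[max_idx]: max_idx=j'
def pvScanA (num : List Char) (i k : Int) (j : Int) (maxIdx : Int) : Int :=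
  if h : j < (num.length : Int) then
    if j - i > k then maxIdx
    else pvScanA num i k (j + 1)
      (if maxIdx < 0 ∨ PySem.List.pyGetD num maxIdx 'a' < PySem.List.pyGetD num j 'a' then j else maxIdx)
  else maxIdx
termination_by ((num.length : Int) - j).toNat
decreasing_by omega

-- inner 'for j in range(max_idx, i, -1): num[j] = num[j-1]'
def pvShiftA (num : List Char) (j i : Int) : List Char :=
  if h : i < j then
    pvShiftA (PySem.List.pySetD num j (PySem.List.pyGetD num (j - 1) 'a')) (j - 1) i
  else num
termination_by (j - i).toNat
decreasing_by omega

-- the outer while loop, fuel = len(num) bounds the number of iterations (i grows by 1 each time)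
def pvWhileA (num : List Char) (i k : Int) : Nat → List Char
  | 0 => num
  | fuel + 1 =>
    if k > 0 ∧ i < (num.length : Int) then
      let maxIdx := pvScanA num i k (i + 1) (-1)
      if PySem.List.pyGetD num i 'a' < PySem.List.pyGetD num maxIdx 'a' then
        let temp := PySem.List.pyGetD num maxIdx 'a'
        let num' := PySem.List.pySetD (pvShiftA num maxIdx i) i temp
        pvWhileA num' (i + 1) (k - (maxIdx - i)) fuel
      else pvWhileA num (i + 1) k fuel
    else num

def maximumPossible (num : String) (k : Int) : String :=
  String.mk (pvWhileA num.toList 0 k num.toList.length)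

-- ===== PORT B =====
-- inner 'for t in range(1, limit+1): if rest[t] > rest[m]: m = t'
def pvScanB (rest : List Char) (limit : Int) (t : Int) (m : Int) : Int :=
  if h : t ≤ limit then
    pvScanB rest limit (t + 1)
      (if PySem.List.pyGetD rest m 'a' < PySem.List.pyGetD rest t 'a' then t else m)
  else m
termination_by (limit + 1 - t).toNat
decreasing_by omega

-- the outer while loop; 'out' is represented by the cons-prefix of the result
def pvLoopB (rest : List Char) (k : Int) : Nat → List Char
  | 0 => rest
  | fuel + 1 =>
    if k > 0 ∧ 1 < (rest.length : Int) then
      let limit := min k ((rest.length : Int) - 1)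
      let m := pvScanB rest limit 1 0
      let c := PySem.List.pyGetD rest m 'a'
      let rest' := PySem.List.slice rest none (some m) ++ PySem.List.slice rest (some (m + 1)) none
      c :: pvLoopB rest' (k - m) fuel
    else rest

def maximumPossible_alt (num : String) (k : Int) : String :=
  String.mk (pvLoopB num.toList k num.toList.length)

-- ===== PRECONDITION & SPEC =====
def Spec_maximumPossible (num : String) (k : Int) (out : String) : Prop := out = maximumPossible_alt num k
instance (num : String) (k : Int) (out : String) : Decidable (Spec_maximumPossible num k out) := by unfold Spec_maximumPossible; infer_instance

-- ===== CLAIM (what is proved, stated in full; the proofs are below) =====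
def Claim_equal_maximumPossible : Prop := ∀ (num : String) (k : Int), Dom_maximumPossible num k → Spec_maximumPossible num k (maximumPossible num k)

-- ===== LEMMAS AND PROOFS =====

theorem pyGetD_append_nat (pre rest : List Char) (t : Nat) (ht : t < rest.length) :
    PySem.List.pyGetD (pre ++ rest) ((pre.length : Int) + (t : Int)) 'a' = rest.getD t 'a' := by
  have h1 : ((pre.length : Int) + (t : Int)) = ((pre.length + t : Nat) : Int) := by push_cast; ring
  rw [h1, PySem.List.pyGetD_natCast, List.getD_append_right _ _ _ _ (Nat.le_add_right _ _)]
  simp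

theorem pySetD_append_nat (pre rest : List Char) (m : Nat) (v : Char) :
    PySem.List.pySetD (pre ++ rest) ((pre.length : Int) + (m : Int)) v = pre ++ rest.set m v := by
  have h1 : ((pre.length : Int) + (m : Int)) = ((pre.length + m : Nat) : Int) := by push_cast; ring
  rw [h1, PySem.List.pySetD_natCast, List.set_append_right _ _ (Nat.le_add_right _ _)]
  simp

theorem shiftA_eq (m : Nat) : ∀ (pre rest : List Char), m < rest.length →
    pvShiftA (pre ++ rest) ((pre.length : Int) + (m : Int)) (pre.length : Int)
      = pre ++ (rest.getD 0 'a' :: (rest.take m ++ rest.drop (m + 1))) := by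
  induction m with
  | zero =>
    intro pre rest h
    rw [pvShiftA, dif_neg (by omega)]
    cases rest with
    | nil => simp at h
    | cons c t => simp
  | succ m ih =>
    intro pre rest h
    rw [pvShiftA, dif_pos (by push_cast; omega)]
    have e1 : (pre.length : Int) + ((m + 1 : Nat) : Int) - 1 = (pre.length : Int) + (m : Int) := by
      push_cast; ring
    have e2 : ((pre.length : Int) + ((m + 1 : Nat) : Int)) = ((pre.length : Int) + ((m + 1 : Nat) : Int)) := rfl
    rw [e1, pyGetD_append_nat pre rest m (by omega), pySetD_append_nat pre rest (m + 1)]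
    rw [ih pre (rest.set (m + 1) (rest.getD m 'a')) (by simpa using by omega)]
    have g0 : (rest.set (m + 1) (rest.getD m 'a')).getD 0 'a' = rest.getD 0 'a' := by
      rw [List.getD_eq_getElem?_getD, List.getElem?_set_ne (by omega), ← List.getD_eq_getElem?_getD]
    have gt : (rest.set (m + 1) (rest.getD m 'a')).take m = rest.take m :=
      List.take_set_of_le (by omega)
    have hm1 : m + 1 < (rest.set (m + 1) (rest.getD m 'a')).length := by simpa using h
    have gd : (rest.set (m + 1) (rest.getD m 'a')).drop (m + 1)
        = rest.getD m 'a' :: rest.drop (m + 2) := by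
      rw [List.drop_eq_getElem_cons hm1, List.getElem_set_self, List.drop_set_of_lt (by omega)]
    rw [g0, gt, gd]
    have hgm : rest.getD m 'a' = rest[m]'(by omega) := by
      rw [List.getD_eq_getElem?_getD, List.getElem?_eq_getElem (by omega : m < rest.length)]; rfl
    have htake : List.take (m + 1) rest = List.take m rest ++ [rest[m]'(by omega)] :=
      List.take_succ_eq_append_getElem (by omega)
    rw [hgm, htake, List.append_assoc, List.singleton_append, show m + 1 + 1 = m + 2 by omega]

theorem scanRel (steps : Nat) : ∀ (pre rest : List Char) (k limit : Int) (t a m : Nat),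
    limit = min k ((rest.length : Int) - 1) → 1 ≤ k → 2 ≤ rest.length →
    (t : Int) = limit + 1 - steps →
    1 ≤ a → a < t → a < rest.length → m < t → m < rest.length →
    (m = 0 → rest.getD a 'a' ≤ rest.getD 0 'a') →
    (m ≠ 0 → a = m ∧ rest.getD 0 'a' < rest.getD m 'a') →
    ∃ a' m' : Nat,
      pvScanA (pre ++ rest) (pre.length : Int) k ((pre.length : Int) + (t : Int)) ((pre.length : Int) + (a : Int)) = (pre.length : Int) + (a' : Int) ∧
      pvScanB rest limit (t : Int) (m : Int) = (m' : Int) ∧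
      1 ≤ a' ∧ a' < rest.length ∧ m' < rest.length ∧
      (m' = 0 → rest.getD a' 'a' ≤ rest.getD 0 'a') ∧
      (m' ≠ 0 → a' = m' ∧ rest.getD 0 'a' < rest.getD m' 'a') := by
  induction steps with
  | zero =>
    intro pre rest k limit t a m hlim hk hn ht ha1 hat han hmt hmn hm0 hmne
    refine ⟨a, m, ?_, ?_, ha1, han, hmn, hm0, hmne⟩
    · rw [pvScanA]
      by_cases hlt : (pre.length : Int) + (t : Int) < (((pre ++ rest).length : Nat) : Int)
      · rw [dif_pos hlt, if_pos (by simp at hlt; omega)]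
      · rw [dif_neg hlt]
    · rw [pvScanB, dif_neg (by omega)]
  | succ steps ih =>
    intro pre rest k limit t a m hlim hk hn ht ha1 hat han hmt hmn hm0 hmne
    have htlim : (t : Int) ≤ limit := by omega
    have htn : t < rest.length := by omega
    rw [pvScanA, dif_pos (by simp; omega), if_neg (by omega)]
    rw [pvScanB, dif_pos htlim]
    rw [pyGetD_append_nat pre rest t htn, pyGetD_append_nat pre rest a han]
    have hia : ¬ ((pre.length : Int) + (a : Int) < 0) := by omega
    simp only [hia, false_or]
    simp only [PySem.List.pyGetD_natCast]
    have hsucc : ∀ x : Nat, (pre.length : Int) + (x : Int) + 1 = (pre.length : Int) + ((x + 1 : Nat) : Int) := by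
      intro x; push_cast; ring
    have hsucc2 : ∀ x : Nat, (x : Int) + 1 = ((x + 1 : Nat) : Int) := by intro x; push_cast; ring
    by_cases hm : m = 0
    · subst hm
      have hle : rest.getD a 'a' ≤ rest.getD 0 'a' := hm0 rfl
      by_cases hB : rest.getD 0 'a' < rest.getD t 'a'
      · have hA : rest.getD a 'a' < rest.getD t 'a' := lt_of_le_of_lt hle hB
        rw [if_pos hA, if_pos hB, hsucc t, hsucc2 t]
        have hcast : ((0 : Nat) : Int) = (0 : Int) := rfl
        rw [show ((0:Int)) = ((0:Nat) : Int) from rfl] at *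
        exact ih pre rest k limit (t + 1) t t hlim hk hn (by push_cast; omega)
          (by omega) (by omega) htn (by omega) htn
          (fun h => absurd h (by omega)) (fun _ => ⟨rfl, hB⟩)
      · rw [if_neg hB, hsucc t, hsucc2 t]
        by_cases hA : rest.getD a 'a' < rest.getD t 'a'
        · rw [if_pos hA]
          exact ih pre rest k limit (t + 1) t 0 hlim hk hn (by push_cast; omega)
            (by omega) (by omega) htn (by omega) (by omega)
            (fun _ => le_of_not_gt hB) (fun h => absurd rfl h)
        · rw [if_neg hA]
          exact ih pre rest k limit (t + 1) a 0 hlim hk hn (by push_cast; omega)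
            ha1 (by omega) han (by omega) (by omega)
            (fun _ => hle) (fun h => absurd rfl h)
    · obtain ⟨ham, hlt0⟩ := hmne hm
      subst ham
      by_cases hA : rest.getD a 'a' < rest.getD t 'a'
      · rw [if_pos hA, if_pos hA, hsucc t, hsucc2 t]
        exact ih pre rest k limit (t + 1) t t hlim hk hn (by push_cast; omega)
          (by omega) (by omega) htn (by omega) htn
          (fun h => absurd h (by omega)) (fun _ => ⟨rfl, lt_trans hlt0 hA⟩)
      · rw [if_neg hA, if_neg hA, hsucc t, hsucc2 t]
        exact ih pre rest k limit (t + 1) a a hlim hk hn (by push_cast; omega)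
          ha1 (by omega) han (by omega) (by omega)
          (fun h => absurd h (by omega)) (fun _ => ⟨rfl, hlt0⟩)

theorem pvLoopB_nil (k : Int) (fuel : Nat) : pvLoopB [] k fuel = [] := by
  cases fuel <;> simp [pvLoopB]

theorem pySetD_append_zero (pre xs : List Char) (x v : Char) :
    PySem.List.pySetD (pre ++ x :: xs) (pre.length : Int) v = pre ++ v :: xs := by
  simpa using pySetD_append_nat pre (x :: xs) 0 v

theorem main_loop_eq (fuel : Nat) : ∀ (pre rest : List Char) (k : Int),
    pvWhileA (pre ++ rest) (pre.length : Int) k fuel = pre ++ pvLoopB rest k fuel := by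
  induction fuel with
  | zero => intro pre rest k; rfl
  | succ fuel ih =>
    intro pre rest k
    by_cases hk : k > 0
    · match rest with
      | [] => simp [pvWhileA, pvLoopB]
      | [c] =>
        simp only [pvWhileA, pvLoopB]
        have hAcond : k > 0 ∧ (pre.length : Int) < (((pre ++ [c]).length : Nat) : Int) :=
          ⟨hk, by simp⟩
        have hBcond : ¬ (k > 0 ∧ (1 : Int) < ((([c] : List Char).length : Nat) : Int)) := by simp
        rw [if_pos hAcond, if_neg hBcond]
        rw [show pvScanA (pre ++ [c]) (pre.length : Int) k ((pre.length : Int) + 1) (-1) = -1 from by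
          rw [pvScanA, dif_neg (by simp)]]
        rw [PySem.List.pyGetD_neg_one_append_singleton]
        have hgi : PySem.List.pyGetD (pre ++ [c]) (pre.length : Int) 'a' = c := by
          simpa using pyGetD_append_nat pre [c] 0 (by simp)
        rw [hgi, if_neg (lt_irrefl c)]
        rw [show (pre.length : Int) + 1 = (((pre ++ [c]).length : Nat) : Int) from by simp]
        have h := ih (pre ++ [c]) [] k
        rw [pvLoopB_nil] at h
        simpa using h
      | c :: c2 :: rs =>
        have hlen : ((pre ++ c :: c2 :: rs).length : Int)
            = (pre.length : Int) + ((c :: c2 :: rs).length : Int) := by simp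
        have hn : (2 : Int) ≤ ((c :: c2 :: rs).length : Int) := by simp; omega
        have hlimge : (1 : Int) ≤ min k (((c :: c2 :: rs).length : Int) - 1) := by omega
        simp only [pvWhileA, pvLoopB]
        have hAcond : k > 0 ∧ (pre.length : Int) < (((pre ++ c :: c2 :: rs).length : Nat) : Int) :=
          ⟨hk, by rw [hlen]; omega⟩
        have hBcond : k > 0 ∧ (1 : Int) < (((c :: c2 :: rs).length : Nat) : Int) := ⟨hk, by omega⟩
        rw [if_pos hAcond, if_pos hBcond]
        -- one step of A's scan
        rw [show pvScanA (pre ++ c :: c2 :: rs) (pre.length : Int) k ((pre.length : Int) + 1) (-1)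
            = pvScanA (pre ++ c :: c2 :: rs) (pre.length : Int) k
                ((pre.length : Int) + ((2 : Nat) : Int)) ((pre.length : Int) + ((1 : Nat) : Int)) from by
          rw [pvScanA, dif_pos (by rw [hlen]; omega), if_neg (by omega), if_pos (Or.inl (by omega))]
          norm_num [add_assoc]]
        -- one step of B's scan
        have g0 : PySem.List.pyGetD (c :: c2 :: rs) (0 : Int) 'a' = (c :: c2 :: rs).getD 0 'a' := by
          rw [show (0 : Int) = ((0 : Nat) : Int) from rfl, PySem.List.pyGetD_natCast]
        have g1 : PySem.List.pyGetD (c :: c2 :: rs) (1 : Int) 'a' = (c :: c2 :: rs).getD 1 'a' := by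
          rw [show (1 : Int) = ((1 : Nat) : Int) from by norm_num, PySem.List.pyGetD_natCast]
        rw [show pvScanB (c :: c2 :: rs) (min k (((c :: c2 :: rs).length : Int) - 1)) 1 0
            = pvScanB (c :: c2 :: rs) (min k (((c :: c2 :: rs).length : Int) - 1)) ((2 : Nat) : Int)
                ((if (c :: c2 :: rs).getD 0 'a' < (c :: c2 :: rs).getD 1 'a' then 1 else 0 : Nat) : Int) from by
          rw [pvScanB, dif_pos hlimge, g0, g1]
          split_ifs with h <;> norm_num]
        obtain ⟨a', m', hAeq, hBeq, ha'1, ha'n, hm'n, inv0, invne⟩ :=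
          scanRel ((min k (((c :: c2 :: rs).length : Int) - 1) - 1).toNat) pre (c :: c2 :: rs) k
            (min k (((c :: c2 :: rs).length : Int) - 1)) 2 1
            (if (c :: c2 :: rs).getD 0 'a' < (c :: c2 :: rs).getD 1 'a' then 1 else 0)
            rfl (by omega) (by simp) (by omega)
            le_rfl (by omega) (by simp) (by split_ifs <;> omega) (by split_ifs <;> simp)
            (by split_ifs with h
                · simp
                · exact fun _ => le_of_not_gt h)
            (by split_ifs with h
                · exact fun _ => ⟨rfl, h⟩
                · simp)
        rw [hAeq, hBeq]
        have hgi : PySem.List.pyGetD (pre ++ c :: c2 :: rs) (pre.length : Int) 'a'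
            = (c :: c2 :: rs).getD 0 'a' := by
          simpa using pyGetD_append_nat pre (c :: c2 :: rs) 0 (by simp)
        have hga : PySem.List.pyGetD (pre ++ c :: c2 :: rs) ((pre.length : Int) + (a' : Int)) 'a'
            = (c :: c2 :: rs).getD a' 'a' := pyGetD_append_nat pre _ a' ha'n
        rw [hgi, hga]
        by_cases hm0 : m' = 0
        · -- no move: A only advances i, B pops the head with k unchanged
          subst hm0
          rw [if_neg (not_lt.mpr (inv0 rfl))]
          rw [List.append_cons pre c (c2 :: rs),
              show (pre.length : Int) + 1 = (((pre ++ [c]).length : Nat) : Int) from by simp,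
              ih (pre ++ [c]) (c2 :: rs) k]
          rw [show ((0 : Nat) : Int) = (0 : Int) from rfl, g0]
          rw [show PySem.List.slice (c :: c2 :: rs) none (some 0) = List.take 0 (c :: c2 :: rs) from
                PySem.List.slice_to_natCast ..,
              show PySem.List.slice (c :: c2 :: rs) (some ((0 : Int) + 1)) none
                  = List.drop 1 (c :: c2 :: rs) from by
                rw [show (0 : Int) + 1 = ((1 : Nat) : Int) from by norm_num]
                exact PySem.List.slice_from_natCast ..]
          simp [List.append_assoc]
        · -- move: A rotates in place, B pops position m'
          obtain ⟨ham, hlt⟩ := invne hm0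
          subst ham
          rw [if_pos hlt,
              shiftA_eq a' pre (c :: c2 :: rs) ha'n,
              pySetD_append_zero,
              show k - ((pre.length : Int) + (a' : Int) - (pre.length : Int)) = k - (a' : Int) from by
                ring,
              List.append_cons pre ((c :: c2 :: rs).getD a' 'a')
                (List.take a' (c :: c2 :: rs) ++ List.drop (a' + 1) (c :: c2 :: rs)),
              show (pre.length : Int) + 1
                  = (((pre ++ [(c :: c2 :: rs).getD a' 'a']).length : Nat) : Int) from by simp,
              ih (pre ++ [(c :: c2 :: rs).getD a' 'a'])
                (List.take a' (c :: c2 :: rs) ++ List.drop (a' + 1) (c :: c2 :: rs)) (k - (a' : Int)),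
              PySem.List.pyGetD_natCast,
              show PySem.List.slice (c :: c2 :: rs) none (some ((a' : Nat) : Int))
                  = List.take a' (c :: c2 :: rs) from PySem.List.slice_to_natCast ..,
              show PySem.List.slice (c :: c2 :: rs) (some (((a' : Nat) : Int) + 1)) none
                  = List.drop (a' + 1) (c :: c2 :: rs) from by
                rw [show ((a' : Nat) : Int) + 1 = ((a' + 1 : Nat) : Int) from by push_cast; ring]
                exact PySem.List.slice_from_natCast ..]
          simp [List.append_assoc]
    · simp only [pvWhileA, pvLoopB]
      rw [if_neg (by omega), if_neg (by omega)]

-- ===== VERDICT (by name: the statement is the Claim_ definition above) =====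
theorem maximumPossible_spec : Claim_equal_maximumPossible := by
  intro num k _
  unfold Spec_maximumPossible maximumPossible maximumPossible_alt
  exact congrArg String.mk (by simpa using main_loop_eq num.toList.length [] num.toList k)
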